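-- pv_equiv track=rewrite | github.com/TienPhucNguyen/Quantitative_Interview | question5/question5.py | count_line_in_python_file
-- ===== SOURCE A (Python) =====
-- def count_line_in_python_file(py_txt_format):
--     count_total = 0
--     count_comment = 0
--     count_code = 0
--     count_function = 0
--     for line in py_txt_format:
--         if line == '':
--             continue
--         count_total += 1
--         if line.startswith('#'):
--             count_comment += 1
--         else:
--             count_code += 1
--         if line.startswith('def'):
--             count_function += 1
--     return count_total, count_comment, count_code, count_function
-- ===== SOURCE B (Python) =====
-- def count_line_in_python_file(py_txt_format):
--     nonblank = [l for l in py_txt_format if l != '']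
--     total = len(nonblank)
--     comment = sum(1 for l in nonblank if l.startswith('#'))
--     function = sum(1 for l in nonblank if l.startswith('def'))
--     return total, comment, total - comment, function
-- ===== Notes on version B (the rewrite author's own statement) =====
-- stated objective: simpler
-- what changed: Replaces the single four-accumulator loop by filtering the non-empty lines once and computing each count as its own pass (len / two startswith counts), deriving code = total - comment arithmetically.
import Mathlib
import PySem

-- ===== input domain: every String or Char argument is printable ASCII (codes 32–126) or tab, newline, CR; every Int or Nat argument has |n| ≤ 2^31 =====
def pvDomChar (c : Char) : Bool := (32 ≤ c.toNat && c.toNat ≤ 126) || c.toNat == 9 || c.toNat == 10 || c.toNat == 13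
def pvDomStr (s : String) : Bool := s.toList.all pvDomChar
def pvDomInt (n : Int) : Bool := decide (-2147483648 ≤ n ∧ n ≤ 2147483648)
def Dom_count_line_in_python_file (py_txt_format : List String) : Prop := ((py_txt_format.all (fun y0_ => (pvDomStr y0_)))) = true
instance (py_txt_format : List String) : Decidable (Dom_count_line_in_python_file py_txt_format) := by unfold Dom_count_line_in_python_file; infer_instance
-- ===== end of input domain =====

-- ===== PORT A =====
def count_line_in_python_file (py_txt_format : List String) : Int × Int × Int × Int :=
  py_txt_format.foldl
    (fun (st : Int × Int × Int × Int) line =>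
      if line == "" then st
      else
        let t := st.1 + 1
        let c := if PySem.Str.startswith line "#" then st.2.1 + 1 else st.2.1
        let k := if PySem.Str.startswith line "#" then st.2.2.1 else st.2.2.1 + 1
        let f := if PySem.Str.startswith line "def" then st.2.2.2 + 1 else st.2.2.2
        (t, c, k, f))
    (0, 0, 0, 0)

-- ===== PORT B =====
-- B: filter the non-empty lines once, then each count is its own pass; code = total - comment.
def count_line_in_python_file_alt (py_txt_format : List String) : Int × Int × Int × Int :=
  let nonblank := py_txt_format.filter (fun l => l ≠ "")
  let total : Int := nonblank.length
  let comment : Int := (nonblank.filter (fun l => PySem.Str.startswith l "#")).length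
  let function : Int := (nonblank.filter (fun l => PySem.Str.startswith l "def")).length
  (total, comment, total - comment, function)

-- ===== PRECONDITION & SPEC =====
def Spec_count_line_in_python_file (py_txt_format : List String) (out : Int × Int × Int × Int) : Prop := out = count_line_in_python_file_alt py_txt_format
instance (py_txt_format : List String) (out : Int × Int × Int × Int) : Decidable (Spec_count_line_in_python_file py_txt_format out) := by unfold Spec_count_line_in_python_file; infer_instance

-- ===== CLAIM (what is proved, stated in full; the proofs are below) =====
def Claim_equal_count_line_in_python_file : Prop := ∀ (py_txt_format : List String), Dom_count_line_in_python_file py_txt_format → Spec_count_line_in_python_file py_txt_format (count_line_in_python_file py_txt_format)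

-- ===== LEMMAS AND PROOFS =====

-- ===== VERDICT (by name: the statement is the Claim_ definition above) =====
-- Loop invariant of A's fold, stated against B's per-pass counts.
theorem cl_fold (ls : List String) (t c k f : Int) :
    ls.foldl
      (fun (st : Int × Int × Int × Int) line =>
        if line == "" then st
        else
          let t := st.1 + 1
          let c := if PySem.Str.startswith line "#" then st.2.1 + 1 else st.2.1
          let k := if PySem.Str.startswith line "#" then st.2.2.1 else st.2.2.1 + 1
          let f := if PySem.Str.startswith line "def" then st.2.2.2 + 1 else st.2.2.2
          (t, c, k, f))
      (t, c, k, f)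
    = (t + ((ls.filter (fun l => l ≠ "")).length : Int),
       c + ((((ls.filter (fun l => l ≠ "")).filter (fun l => PySem.Str.startswith l "#")).length : Int)),
       k + (((ls.filter (fun l => l ≠ "")).length : Int)
            - (((ls.filter (fun l => l ≠ "")).filter (fun l => PySem.Str.startswith l "#")).length : Int)),
       f + ((((ls.filter (fun l => l ≠ "")).filter (fun l => PySem.Str.startswith l "def")).length : Int))) := by
  induction ls generalizing t c k f with
  | nil => simp
  | cons x xs ih =>
    simp only [List.foldl_cons]
    by_cases hx : x = ""
    · rw [if_pos (by simp [hx]), ih]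
      simp [List.filter_cons, hx]
    · rw [if_neg (by simp [hx])]
      rw [ih]
      by_cases h1 : PySem.Chars.startswith x.toList ['#'] <;>
        by_cases h2 : PySem.Chars.startswith x.toList ['d', 'e', 'f'] <;>
        simp [List.filter_cons, hx, h1, h2, Prod.ext_iff] <;> omega

theorem count_line_in_python_file_spec : Claim_equal_count_line_in_python_file := by
  intro ls _
  unfold Spec_count_line_in_python_file count_line_in_python_file count_line_in_python_file_alt
  rw [cl_fold]
  simp
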